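-- pv_equiv track=rewrite | github.com/juheon/LRCAGE | script/find_eventpcoord_againstRef.v3.py | GetArrPcoord
-- ===== SOURCE A (Python) =====
-- def GetArrPcoord( a_str):
-- 	#alignbase to pcoord (1-based)
-- 	nIndex=0;
-- 	arr=[];
-- 	for i in a_str:
-- 		if i.isalpha():
-- 			nIndex=nIndex+1;
-- 			arr.append( nIndex)
-- 		else:
-- 			#0 is place holder for non alphabet base
-- 			arr.append(0)
-- 	return arr
-- ===== SOURCE B (Python) =====
-- def GetArrPcoord(a_str):
--     # prefix-sum table + masking pass instead of one stateful counting loop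
--     flags = [c.isalpha() for c in a_str]
--     cum = []
--     total = 0
--     for f in flags:
--         total += 1 if f else 0
--         cum.append(total)
--     return [c if f else 0 for f, c in zip(flags, cum)]
-- ===== Notes on version B (the rewrite author's own statement) =====
-- stated objective: alternative
-- what changed: Replaces the single stateful counting loop with three passes: an isalpha flag list, an explicit prefix-sum table of alphabetic counts, and a masking pass zipping flags with the table.
import Mathlib
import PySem

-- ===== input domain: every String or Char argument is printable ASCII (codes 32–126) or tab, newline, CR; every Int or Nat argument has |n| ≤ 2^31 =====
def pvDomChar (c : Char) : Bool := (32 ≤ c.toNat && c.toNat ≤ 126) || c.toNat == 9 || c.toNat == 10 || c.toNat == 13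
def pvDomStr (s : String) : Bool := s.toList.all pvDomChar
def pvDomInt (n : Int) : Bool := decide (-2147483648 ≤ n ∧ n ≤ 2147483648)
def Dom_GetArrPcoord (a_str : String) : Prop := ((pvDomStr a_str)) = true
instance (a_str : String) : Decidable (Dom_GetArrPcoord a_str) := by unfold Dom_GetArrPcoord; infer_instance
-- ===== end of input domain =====

-- ===== PORT A =====
-- Port of A: one fold over the characters carrying (nIndex, arr).
def GetArrPcoord (a_str : String) : List Int :=
  (a_str.toList.foldl
    (fun (st : Int × List Int) i =>
      if PySem.Chars.isalpha i then (st.1 + 1, st.2 ++ [st.1 + 1])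
      else (st.1, st.2 ++ [0]))
    (0, [])).2

-- ===== PORT B =====
-- Port of B: flag list, prefix-sum table, then masking pass (B's three passes).
def GetArrPcoord_alt (a_str : String) : List Int :=
  let flags := a_str.toList.map PySem.Chars.isalpha
  let cum := (flags.foldl
      (fun (st : Int × List Int) f =>
        (st.1 + (if f then (1:Int) else 0), st.2 ++ [st.1 + (if f then (1:Int) else 0)]))
      (0, [])).2
  (flags.zip cum).map (fun p => if p.1 then p.2 else 0)

-- ===== PRECONDITION & SPEC =====
def Spec_GetArrPcoord (a_str : String) (out : List Int) : Prop := out = GetArrPcoord_alt a_str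
instance (a_str : String) (out : List Int) : Decidable (Spec_GetArrPcoord a_str out) := by unfold Spec_GetArrPcoord; infer_instance

-- ===== CLAIM (what is proved, stated in full; the proofs are below) =====
def Claim_equal_GetArrPcoord : Prop := ∀ (a_str : String), Dom_GetArrPcoord a_str → Spec_GetArrPcoord a_str (GetArrPcoord a_str)

-- ===== LEMMAS AND PROOFS =====

-- common recursive specification of the output, parametrised by the running count
def pvSpecGo : List Char → Int → List Int
  | [], _ => []
  | c :: t, n =>
    if PySem.Chars.isalpha c then (n + 1) :: pvSpecGo t (n + 1) else 0 :: pvSpecGo t n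

theorem foldA_eq (l : List Char) (n : Int) (acc : List Int) :
    (l.foldl
      (fun (st : Int × List Int) i =>
        if PySem.Chars.isalpha i then (st.1 + 1, st.2 ++ [st.1 + 1])
        else (st.1, st.2 ++ [0]))
      (n, acc)).2 = acc ++ pvSpecGo l n := by
  induction l generalizing n acc with
  | nil => simp [pvSpecGo]
  | cons c t ih =>
    by_cases h : PySem.Chars.isalpha c <;> simp [pvSpecGo, h, ih]

-- prefix-sum table, recursively
def pvCumGo : List Bool → Int → List Int
  | [], _ => []
  | f :: t, n =>
    (n + (if f then 1 else 0)) :: pvCumGo t (n + (if f then 1 else 0))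

theorem foldB_eq (l : List Bool) (n : Int) (acc : List Int) :
    (l.foldl
      (fun (st : Int × List Int) f =>
        (st.1 + (if f then (1:Int) else 0), st.2 ++ [st.1 + (if f then (1:Int) else 0)]))
      (n, acc)).2 = acc ++ pvCumGo l n := by
  induction l generalizing n acc with
  | nil => simp [pvCumGo]
  | cons f t ih => simp [pvCumGo, ih]

theorem maskB_eq (l : List Char) (n : Int) :
    ((l.map PySem.Chars.isalpha).zip (pvCumGo (l.map PySem.Chars.isalpha) n)).map
        (fun p => if p.1 then p.2 else 0) = pvSpecGo l n := by
  induction l generalizing n with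
  | nil => simp [pvSpecGo]
  | cons c t ih =>
    by_cases h : PySem.Chars.isalpha c <;>
      simp [pvSpecGo, pvCumGo, h, ih]

-- ===== VERDICT (by name: the statement is the Claim_ definition above) =====
theorem GetArrPcoord_spec : Claim_equal_GetArrPcoord := by
  intro a_str _
  unfold Spec_GetArrPcoord GetArrPcoord GetArrPcoord_alt
  simp only [foldA_eq, foldB_eq, List.nil_append]
  exact (maskB_eq _ _).symm
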